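-- pv_equiv track=rewrite | github.com/remusezequiel/Lic.-Ciencia-de-Datos | Algoritmos_Y_Estructuras_De_Datos/aed_1/Practica/CodigoGuiasPython/EjemplosDeUso/Ej_Guia6/ej2.py | cantidad_de_pizzas
-- ===== SOURCE A (Python) =====
-- def cantidad_de_pizzas(comensales:int,min_cant_porciones:int)->int:
--     res = 1
--     p=1
--     condicion = comensales*min_cant_porciones
--     while condicion>8:
--         if condicion >= 8:
--             res=1+res
--         condicion=condicion-8
--     p=res
--     return res
-- ===== SOURCE B (Python) =====
-- def cantidad_de_pizzas(comensales: int, min_cant_porciones: int) -> int: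
--     n = comensales * min_cant_porciones
--     return max(1, -((-n) // 8))
-- ===== Notes on version B (the rewrite author's own statement) =====
-- stated objective: faster
-- what changed: Replaced the subtract-8-until-<=8 counting loop by a closed-form ceiling division: max(1, ceil(n/8)) with n = comensales*min_cant_porciones.
import Mathlib
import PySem

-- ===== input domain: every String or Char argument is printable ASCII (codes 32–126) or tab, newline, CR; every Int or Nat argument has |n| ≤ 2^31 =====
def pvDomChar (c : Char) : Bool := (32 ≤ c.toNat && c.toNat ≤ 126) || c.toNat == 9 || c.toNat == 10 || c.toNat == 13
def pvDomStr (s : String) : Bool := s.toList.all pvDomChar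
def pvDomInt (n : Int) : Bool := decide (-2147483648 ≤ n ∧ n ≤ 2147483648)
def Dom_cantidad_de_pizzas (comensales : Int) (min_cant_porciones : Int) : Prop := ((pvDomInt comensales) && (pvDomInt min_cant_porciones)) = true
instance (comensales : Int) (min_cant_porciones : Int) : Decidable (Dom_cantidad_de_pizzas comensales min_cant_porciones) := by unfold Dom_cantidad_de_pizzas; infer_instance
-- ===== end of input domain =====

-- B replaces A's subtract-8 counting loop by the closed form max(1, ceil(n/8)); objective: faster (O(1) vs O(n)).

-- ===== PORT A =====
-- the while loop: while condicion > 8: res = 1 + res; condicion = condicion - 8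
-- (the inner 'if condicion >= 8' is always true when 8 < condicion, but is kept literally)
def pizzasLoop (condicion res : Int) : Int :=
  if 8 < condicion then
    pizzasLoop (condicion - 8) (if 8 ≤ condicion then 1 + res else res)
  else res
termination_by condicion.toNat
decreasing_by omega

def cantidad_de_pizzas (comensales : Int) (min_cant_porciones : Int) : Int :=
  pizzasLoop (comensales * min_cant_porciones) 1

-- ===== PORT B =====
def cantidad_de_pizzas_alt (comensales : Int) (min_cant_porciones : Int) : Int :=
  max 1 (-(PySem.Int.floordiv (-(comensales * min_cant_porciones)) 8))

-- ===== PRECONDITION & SPEC =====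
def Spec_cantidad_de_pizzas (comensales : Int) (min_cant_porciones : Int) (out : Int) : Prop := out = cantidad_de_pizzas_alt comensales min_cant_porciones
instance (comensales : Int) (min_cant_porciones : Int) (out : Int) : Decidable (Spec_cantidad_de_pizzas comensales min_cant_porciones out) := by unfold Spec_cantidad_de_pizzas; infer_instance

-- ===== CLAIM (what is proved, stated in full; the proofs are below) =====
def Claim_equal_cantidad_de_pizzas : Prop := ∀ (comensales : Int) (min_cant_porciones : Int), Dom_cantidad_de_pizzas comensales min_cant_porciones → Spec_cantidad_de_pizzas comensales min_cant_porciones (cantidad_de_pizzas comensales min_cant_porciones)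

-- ===== LEMMAS AND PROOFS =====
theorem pizzasLoop_eq (n res : Int) :
    pizzasLoop n res = if 8 < n then res - 1 + (-(PySem.Int.floordiv (-n) 8)) else res := by
  rw [pizzasLoop]
  split
  · rw [if_pos (by omega), pizzasLoop_eq (n - 8) (1 + res)]
    rw [PySem.Int.floordiv_eq_ediv_of_pos (by norm_num),
        PySem.Int.floordiv_eq_ediv_of_pos (by norm_num)]
    split <;> omega
  · simp [*]
termination_by n.toNat
decreasing_by omega

-- ===== VERDICT (by name: the statement is the Claim_ definition above) =====
theorem cantidad_de_pizzas_spec : Claim_equal_cantidad_de_pizzas := by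
  intro c m _
  unfold Spec_cantidad_de_pizzas cantidad_de_pizzas cantidad_de_pizzas_alt
  rw [pizzasLoop_eq, PySem.Int.floordiv_eq_ediv_of_pos (by norm_num)]
  split <;> omega
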